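-- pv_equiv track=rewrite | github.com/pangyouzhen/data-structure | contest/isEvenOddTree.py | is_increse
-- ===== SOURCE A (Python) =====
-- def is_increse(vals):
--     a = vals[0]
--     for i in vals[1:]:
--         if i % 2 != 0:
--             if i > a:
--                 a = i
--                 continue
--             else:
--                 return False
--         else:
--             return False
--     return True
-- ===== SOURCE B (Python) =====
-- def is_increse(vals):
--     a = vals[0]
--     return all(x % 2 != 0 for x in vals[1:]) and all(y > x for x, y in zip(vals, vals[1:]))
-- ===== Notes on version B (the rewrite author's own statement) =====
-- stated objective: simpler
-- what changed: Replaces the accumulator-threaded loop with early returns by the conjunction of two independent scans: every element after the first is odd, and consecutive pairs are strictly increasing.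
import Mathlib
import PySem

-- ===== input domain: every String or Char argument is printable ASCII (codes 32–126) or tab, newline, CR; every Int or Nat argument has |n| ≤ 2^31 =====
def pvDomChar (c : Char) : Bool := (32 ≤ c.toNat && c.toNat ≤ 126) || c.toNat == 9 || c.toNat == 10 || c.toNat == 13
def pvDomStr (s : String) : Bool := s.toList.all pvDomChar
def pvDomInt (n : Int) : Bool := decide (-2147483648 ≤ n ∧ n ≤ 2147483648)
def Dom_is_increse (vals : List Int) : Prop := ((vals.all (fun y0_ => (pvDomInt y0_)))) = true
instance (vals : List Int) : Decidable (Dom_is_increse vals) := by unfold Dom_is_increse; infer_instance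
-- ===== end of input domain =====

-- B is simpler: the single accumulator loop becomes two independent scans (all-odd on the tail, pairwise increasing) combined with &&.
-- ===== PORT A =====
-- the loop 'for i in vals[1:]' with accumulator a and early returns
def is_increse_loop (a : Int) (rest : List Int) : Bool :=
  match rest with
  | [] => true
  | i :: t =>
    if PySem.Int.mod i 2 ≠ 0 then
      if i > a then is_increse_loop i t else false
    else false

def is_increse (vals : List Int) : Bool :=
  match vals with
  | [] => false   -- unreachable under Pre_: Python raises IndexError on vals[0]
  | a :: rest => is_increse_loop a rest

-- ===== PORT B =====
def is_increse_alt (vals : List Int) : Bool :=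
  match vals with
  | [] => false   -- unreachable under Pre_: Python raises IndexError on vals[0]
  | _ :: rest =>
    rest.all (fun x => PySem.Int.mod x 2 ≠ 0) &&
    (vals.zip rest).all (fun p => p.2 > p.1)

-- ===== PRECONDITION & SPEC =====
-- A raises IndexError on the empty list (vals[0]); B does too, so Pre_ excludes it.
def Pre_is_increse (vals : List Int) : Prop := vals ≠ []
instance (vals : List Int) : Decidable (Pre_is_increse vals) := by unfold Pre_is_increse; infer_instance
def pvWitness_is_increse : List Int := [1, 3, 5]

def Spec_is_increse (vals : List Int) (out : Bool) : Prop := out = is_increse_alt vals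
instance (vals : List Int) (out : Bool) : Decidable (Spec_is_increse vals out) := by unfold Spec_is_increse; infer_instance

-- ===== CLAIM (what is proved, stated in full; the proofs are below) =====
def Claim_equal_is_increse : Prop := ∀ (vals : List Int), Dom_is_increse vals → Pre_is_increse vals → Spec_is_increse vals (is_increse vals)

-- ===== LEMMAS AND PROOFS =====
theorem is_increse_loop_eq (rest : List Int) (a : Int) :
    is_increse_loop a rest =
      (rest.all (fun x => PySem.Int.mod x 2 ≠ 0) &&
       ((a :: rest).zip rest).all (fun p => p.2 > p.1)) := by
  induction rest generalizing a with
  | nil => rfl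
  | cons i t ih =>
    simp only [is_increse_loop, List.zip, List.all_cons, ih]
    by_cases h1 : PySem.Int.mod i 2 ≠ 0 <;> by_cases h2 : i > a <;>
      simp [h1, h2, Bool.and_comm, Bool.and_assoc, Bool.and_left_comm]

-- ===== VERDICT (by name: the statement is the Claim_ definition above) =====
theorem is_increse_spec : Claim_equal_is_increse := by
  intro vals _ hpre
  unfold Spec_is_increse
  match vals with
  | [] => exact absurd rfl hpre
  | a :: rest =>
    simp only [is_increse, is_increse_alt]
    exact is_increse_loop_eq rest a
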